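-- pv_equiv track=rewrite | github.com/JDZW2014/python_full_stack | src/_4_data_structure/p19/t2.py | dui_shu_qi
-- ===== SOURCE A (Python) =====
-- def dui_shu_qi(n):
--     """
--     先写个暴力的方法，观察规律
--     """
--     if n < 6:
--         return -1
--     max_8 = n // 8
--     left_num = n - max_8 * 8
--     while max_8 >= 0:
--         if left_num % 6 == 0:
--             return max_8 + (left_num // 6)
--         else:
--             max_8 -= 1
--             left_num += 8
--     return -1
-- ===== SOURCE B (Python) =====
-- def dui_shu_qi(n):
--     if n < 6:
--         return -1
--     if n % 2:
--         return -1
--     m = n // 2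
--     bmax = n // 8
--     b = bmax - (bmax - m) % 3
--     if b < 0:
--         return -1
--     return b + (n - 8 * b) // 6
-- ===== Notes on version B (the rewrite author's own statement) =====
-- stated objective: faster
-- what changed: Replaced the decrementing trial loop over the 8-count with a closed-form O(1) computation: parity test plus modular arithmetic picks the largest valid 8-count directly.
import Mathlib
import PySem

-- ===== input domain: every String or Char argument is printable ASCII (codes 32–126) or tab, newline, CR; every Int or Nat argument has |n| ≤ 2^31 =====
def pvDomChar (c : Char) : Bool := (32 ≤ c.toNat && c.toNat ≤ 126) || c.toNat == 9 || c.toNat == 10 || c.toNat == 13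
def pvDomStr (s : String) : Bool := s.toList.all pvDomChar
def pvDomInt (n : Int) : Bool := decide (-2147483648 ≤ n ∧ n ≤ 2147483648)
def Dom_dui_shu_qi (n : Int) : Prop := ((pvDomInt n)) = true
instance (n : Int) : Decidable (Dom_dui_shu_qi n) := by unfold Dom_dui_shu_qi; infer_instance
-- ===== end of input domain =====

-- B replaces A's decrementing trial loop by a closed-form modular computation (O(1) instead of O(n)).

-- ===== PORT A =====
-- the while loop of A: state (max_8, left_num); terminates because max_8 strictly decreases
def duiLoopA (max8 leftNum : Int) : Int :=
  if _h : max8 < 0 then -1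
  else if PySem.Int.mod leftNum 6 = 0 then max8 + PySem.Int.floordiv leftNum 6
  else duiLoopA (max8 - 1) (leftNum + 8)
termination_by (max8 + 1).toNat
decreasing_by omega

def dui_shu_qi (n : Int) : Int :=
  if n < 6 then -1
  else
    let max8 := PySem.Int.floordiv n 8
    let leftNum := n - max8 * 8
    duiLoopA max8 leftNum

-- ===== PORT B =====
def dui_shu_qi_alt (n : Int) : Int :=
  if n < 6 then -1
  else if PySem.Int.mod n 2 ≠ 0 then -1
  else
    let m := PySem.Int.floordiv n 2
    let bmax := PySem.Int.floordiv n 8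
    let b := bmax - PySem.Int.mod (bmax - m) 3
    if b < 0 then -1 else b + PySem.Int.floordiv (n - 8 * b) 6

-- ===== PRECONDITION & SPEC =====
def Spec_dui_shu_qi (n : Int) (out : Int) : Prop := out = dui_shu_qi_alt n
instance (n : Int) (out : Int) : Decidable (Spec_dui_shu_qi n out) := by unfold Spec_dui_shu_qi; infer_instance

-- ===== CLAIM (what is proved, stated in full; the proofs are below) =====
def Claim_equal_dui_shu_qi : Prop := ∀ (n : Int), Dom_dui_shu_qi n → Spec_dui_shu_qi n (dui_shu_qi n)

-- ===== LEMMAS AND PROOFS =====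

-- the number of failing iterations before the loop can succeed, determined by leftNum mod 6
def kOf (leftNum : Int) : Int :=
  if leftNum % 6 = 0 then 0 else if leftNum % 6 = 4 then 1 else 2

lemma duiLoopA_odd (max8 leftNum : Int) (h : leftNum % 2 = 1) :
    duiLoopA max8 leftNum = -1 := by
  induction max8, leftNum using duiLoopA.induct with
  | case1 max8 leftNum hneg => rw [duiLoopA]; simp [hneg]
  | case2 max8 leftNum hneg hz =>
      exfalso
      rw [PySem.Int.mod_eq_emod_of_pos (by omega)] at hz
      omega
  | case3 max8 leftNum hneg hz ih =>
      rw [duiLoopA, dif_neg hneg, if_neg hz]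
      exact ih (by omega)

lemma duiLoopA_even (max8 leftNum : Int) (hnn : 0 ≤ leftNum) (hev : leftNum % 2 = 0) :
    duiLoopA max8 leftNum =
      if kOf leftNum ≤ max8 then (max8 - kOf leftNum) + (leftNum + 8 * kOf leftNum) / 6
      else -1 := by
  induction max8, leftNum using duiLoopA.induct with
  | case1 max8 leftNum hneg =>
      rw [duiLoopA]; rw [dif_pos hneg]
      rw [if_neg]
      unfold kOf; split_ifs <;> omega
  | case2 max8 leftNum hneg hz =>
      rw [duiLoopA]; rw [dif_neg hneg]
      rw [if_pos hz]
      rw [PySem.Int.mod_eq_emod_of_pos (by omega)] at hz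
      rw [PySem.Int.floordiv_eq_ediv_of_pos (by omega)]
      rw [if_pos]
      · unfold kOf; rw [if_pos hz]; ring_nf
      · unfold kOf; rw [if_pos hz]; omega
  | case3 max8 leftNum hneg hz ih =>
      rw [duiLoopA]; rw [dif_neg hneg]
      rw [if_neg hz]
      rw [PySem.Int.mod_eq_emod_of_pos (by omega)] at hz
      rw [ih (by omega) (by omega)]
      unfold kOf
      split_ifs <;> omega

-- ===== VERDICT (by name: the statement is the Claim_ definition above) =====
theorem dui_shu_qi_spec : Claim_equal_dui_shu_qi := by
  intro n _
  unfold Spec_dui_shu_qi dui_shu_qi dui_shu_qi_alt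
  by_cases hlt : n < 6
  · simp [hlt]
  · simp only [if_neg hlt]
    have h8 : PySem.Int.floordiv n 8 = n / 8 := PySem.Int.floordiv_eq_ediv_of_pos (by omega)
    have h2m : PySem.Int.mod n 2 = n % 2 := PySem.Int.mod_eq_emod_of_pos (by omega)
    set b0 : Int := n / 8 with hb0
    have hleft : n - b0 * 8 = n % 8 := by omega
    by_cases hodd : n % 2 = 1
    · -- odd n: the loop never succeeds, B's parity test returns -1 immediately
      rw [h8, hleft, duiLoopA_odd _ _ (by omega)]
      rw [h2m]; simp [hodd]
    · have hev : n % 2 = 0 := by omega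
      rw [h8, hleft, duiLoopA_even _ _ (by omega) (by omega)]
      simp only [h2m, hev, ne_eq, not_true_eq_false, if_false]
      rw [PySem.Int.mod_eq_emod_of_pos (show (0:Int) < 3 by omega),
          PySem.Int.floordiv_eq_ediv_of_pos (show (0:Int) < 2 by omega)]
      have hk : kOf (n % 8) = (b0 - n / 2) % 3 := by
        unfold kOf; split_ifs <;> omega
      rw [← hk]
      have hknn : 0 ≤ kOf (n % 8) ∧ kOf (n % 8) ≤ 2 := by unfold kOf; split_ifs <;> omega
      rw [PySem.Int.floordiv_eq_ediv_of_pos (show (0:Int) < 6 by omega)]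
      by_cases hble : kOf (n % 8) ≤ b0
      · rw [if_pos hble, if_neg (by omega)]
        have hd : (6:Int) ∣ n % 8 + 8 * kOf (n % 8) := by unfold kOf; split_ifs <;> omega
        omega
      · rw [if_neg hble, if_pos (by omega)]
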